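-- pv_equiv track=rewrite | github.com/DerReparator/advent-of-code-2023 | day02/py/solution2.py | calculatePowerOfGame
-- ===== SOURCE A (Python) =====
-- from typing import List, Tuple, Dict
-- import math
--
-- def calculatePowerOfGame(game: List[Dict[str, int]]) -> int:
--     max_cubes_per_color: Dict[str, int] = {}
--     for a_round in game:
--         for color, amount in a_round.items():
--             if max_cubes_per_color.get(color) is None\
--             or max_cubes_per_color[color] < amount:
--                 max_cubes_per_color[color] = amount
--     return math.prod(max_cubes_per_color.values())
-- ===== SOURCE B (Python) =====
-- import math
--
--
-- def calculatePowerOfGame(game):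
--     # Pass 1: list of distinct colors in first-appearance order.
--     colors = []
--     for a_round in game:
--         for color in a_round:
--             if color not in colors:
--                 colors.append(color)
--     # Pass 2: for each color, rescan the whole game for its maximum amount.
--     return math.prod(
--         max(a_round[color] for a_round in game if color in a_round)
--         for color in colors
--     )
-- ===== Notes on version B (the rewrite author's own statement) =====
-- stated objective: alternative
-- what changed: B maintains no per-color running state at all: it first collects the distinct colors in order of first appearance, then for each color makes a separate full scan of the game taking the max of that color's amounts, instead of A's single fused loop threading a dict of running maxima.
import Mathlib
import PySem

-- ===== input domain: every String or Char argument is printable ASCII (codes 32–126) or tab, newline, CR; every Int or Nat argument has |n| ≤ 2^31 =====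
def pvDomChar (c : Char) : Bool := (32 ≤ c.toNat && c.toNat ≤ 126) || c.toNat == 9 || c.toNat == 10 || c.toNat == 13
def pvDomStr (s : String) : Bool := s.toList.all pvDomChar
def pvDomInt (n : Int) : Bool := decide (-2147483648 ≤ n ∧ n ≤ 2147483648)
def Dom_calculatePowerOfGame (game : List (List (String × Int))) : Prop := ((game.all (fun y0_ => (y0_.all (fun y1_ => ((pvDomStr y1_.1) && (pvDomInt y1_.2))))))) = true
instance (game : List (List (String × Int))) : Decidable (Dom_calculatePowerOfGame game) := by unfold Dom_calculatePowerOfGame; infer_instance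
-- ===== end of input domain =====

-- B drops A's running-max dict entirely: a first pass lists the distinct colors, then each
-- color gets its own full rescan of the game reduced with max (objective: alternative).

-- ===== PORT A =====
-- one step of A's inner loop: `if max_cubes_per_color.get(color) is None or max_cubes_per_color[color] < amount: ... = amount`
def pvStepA (d : PySem.Dict String Int) (p : String × Int) : PySem.Dict String Int :=
  match d.get? p.1 with
  | none => d.insert p.1 p.2
  | some v => if v < p.2 then d.insert p.1 p.2 else d

def calculatePowerOfGame (game : List (List (String × Int))) : Int :=
  let max_cubes_per_color : PySem.Dict String Int :=
    game.foldl (fun d a_round => a_round.foldl pvStepA d) PySem.Dict.empty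
  -- math.prod(max_cubes_per_color.values())
  max_cubes_per_color.values.prod

-- ===== PORT B =====
-- one step of B's first pass: `if color not in colors: colors.append(color)`
def pvAddColor (acc : List String) (p : String × Int) : List String :=
  if acc.contains p.1 then acc else acc ++ [p.1]

-- B's first pass over the whole game
def pvColors (game : List (List (String × Int))) : List String :=
  game.foldl (fun acc a_round => a_round.foldl pvAddColor acc) []

-- `[a_round[color] for a_round in game if color in a_round]` (dict lookup = first match)
def pvColorAmounts (game : List (List (String × Int))) (color : String) : List Int :=
  game.filterMap (fun a_round => (a_round.find? (fun p => p.1 == color)).map Prod.snd)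

-- Python's max(...); every list B hands it is nonempty, so the [] case is never reached
def pvMaxList (l : List Int) : Int :=
  match l with
  | [] => 0
  | h :: t => t.foldl max h

def calculatePowerOfGame_alt (game : List (List (String × Int))) : Int :=
  ((pvColors game).map (fun color => pvMaxList (pvColorAmounts game color))).prod

-- ===== PRECONDITION & SPEC =====
-- Pre_ excludes games in which some round's association list carries a duplicate color key:
-- the Python argument is a dict per round, which has already collapsed such duplicates
-- (last value wins), so the duplicate-keyed assoc-list encoding corresponds to no dict and
-- neither port can be faithful to the Python functions there.
def Pre_calculatePowerOfGame (game : List (List (String × Int))) : Prop :=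
  ∀ r ∈ game, (r.map Prod.fst).Nodup
instance (game : List (List (String × Int))) : Decidable (Pre_calculatePowerOfGame game) := by
  unfold Pre_calculatePowerOfGame; infer_instance

def pvWitness_calculatePowerOfGame : (List (List (String × Int))) :=
  [[("red", 3), ("blue", 2)], [("red", 1), ("green", 4)]]

def Spec_calculatePowerOfGame (game : List (List (String × Int))) (out : Int) : Prop := out = calculatePowerOfGame_alt game
instance (game : List (List (String × Int))) (out : Int) : Decidable (Spec_calculatePowerOfGame game out) := by unfold Spec_calculatePowerOfGame; infer_instance

-- ===== CLAIM (what is proved, stated in full; the proofs are below) =====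
def Claim_equal_calculatePowerOfGame : Prop := ∀ (game : List (List (String × Int))), Dom_calculatePowerOfGame game → Pre_calculatePowerOfGame game → Spec_calculatePowerOfGame game (calculatePowerOfGame game)

-- ===== LEMMAS AND PROOFS =====

-- all amounts for color c among a flat list of pairs
def pvAmts (l : List (String × Int)) (c : String) : List Int :=
  (l.filter (fun p => p.1 == c)).map Prod.snd

-- the effect of one pvStepA step on a single lookup, as an Option fold step
def pvOptStep (o : Option Int) (x : Int) : Option Int :=
  some (match o with | none => x | some v => max v x)

theorem pvStepA_get? (d : PySem.Dict String Int) (p : String × Int) (c : String) :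
    (pvStepA d p).get? c = if p.1 = c then pvOptStep (d.get? c) p.2 else d.get? c := by
  unfold pvStepA pvOptStep
  by_cases hc : p.1 = c
  · subst hc
    cases h : d.get? p.1 with
    | none => simp [PySem.Dict.get?_insert_self, h]
    | some v =>
      by_cases hlt : v < p.2
      · simp [hlt, PySem.Dict.get?_insert_self, h, max_eq_right (le_of_lt hlt)]
      · simp [hlt, h, max_eq_left (le_of_not_gt hlt)]
  · have hne : c ≠ p.1 := Ne.symm hc
    cases h : d.get? p.1 with
    | none => simp [hc, PySem.Dict.get?_insert, hne]
    | some v =>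
      by_cases hlt : v < p.2
      · simp [hc, hlt, PySem.Dict.get?_insert, hne]
      · simp [hc, hlt]

theorem pvFold_get? (l : List (String × Int)) (d : PySem.Dict String Int) (c : String) :
    (l.foldl pvStepA d).get? c = (pvAmts l c).foldl pvOptStep (d.get? c) := by
  induction l generalizing d with
  | nil => rfl
  | cons p t ih =>
    by_cases hc : p.1 = c
    · simp [List.foldl_cons, ih, pvAmts, List.filter_cons, hc, pvStepA_get?]
    · simp [List.foldl_cons, ih, pvAmts, List.filter_cons, hc, pvStepA_get?]

-- flat list of all of c's amounts across the whole game
def pvAmtsG (game : List (List (String × Int))) (c : String) : List Int :=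
  game.flatMap (fun r => pvAmts r c)

theorem pvGameFold_get? (game : List (List (String × Int))) (d : PySem.Dict String Int) (c : String) :
    (game.foldl (fun d r => r.foldl pvStepA d) d).get? c
      = (pvAmtsG game c).foldl pvOptStep (d.get? c) := by
  induction game generalizing d with
  | nil => rfl
  | cons r t ih =>
    simp only [List.foldl_cons, pvAmtsG, List.flatMap_cons, List.foldl_append]
    rw [ih, pvFold_get?]
    rfl

theorem pvOptStep_some (a : Int) (l : List Int) :
    l.foldl pvOptStep (some a) = some (l.foldl max a) := by
  induction l generalizing a with
  | nil => rfl
  | cons x t ih => simp [List.foldl_cons, pvOptStep, ih]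

theorem pvOptStep_none (l : List Int) (h : l ≠ []) :
    l.foldl pvOptStep none = some (pvMaxList l) := by
  cases l with
  | nil => exact absurd rfl h
  | cons x t => simp [List.foldl_cons, pvOptStep, pvMaxList, pvOptStep_some]

-- keys of A's dict evolve exactly like B's color list
theorem pvStepA_keys (d : PySem.Dict String Int) (p : String × Int) :
    (pvStepA d p).keys = pvAddColor d.keys p := by
  unfold pvStepA pvAddColor
  cases h : d.get? p.1 with
  | none =>
    have hc : d.contains p.1 = false := by
      rw [PySem.Dict.contains_eq_isSome_get?, h]; rfl
    have hm : p.1 ∉ d.keys := fun hmem => by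
      have := (PySem.Dict.contains_iff_mem_keys d p.1).mpr hmem
      simp [hc] at this
    simp [PySem.Dict.keys_insert_of_not_contains d _ hc, hm]
  | some v =>
    have hc : d.contains p.1 = true := by
      rw [PySem.Dict.contains_eq_isSome_get?, h]; rfl
    have hm : p.1 ∈ d.keys := (PySem.Dict.contains_iff_mem_keys d p.1).mp hc
    by_cases hlt : v < p.2
    · simp [hlt, PySem.Dict.keys_insert_of_contains d _ hc, hm]
    · simp [hlt, hm]

theorem pvFold_keys (l : List (String × Int)) (d : PySem.Dict String Int) :
    (l.foldl pvStepA d).keys = l.foldl pvAddColor d.keys := by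
  induction l generalizing d with
  | nil => rfl
  | cons p t ih => simp [List.foldl_cons, ih, pvStepA_keys]

theorem pvGameFold_keys (game : List (List (String × Int))) (d : PySem.Dict String Int) :
    (game.foldl (fun d r => r.foldl pvStepA d) d).keys
      = game.foldl (fun acc r => r.foldl pvAddColor acc) d.keys := by
  induction game generalizing d with
  | nil => rfl
  | cons r t ih => simp [List.foldl_cons, ih, pvFold_keys]

theorem pvAddColor_nodup (l : List (String × Int)) (acc : List String) (h : acc.Nodup) :
    (l.foldl pvAddColor acc).Nodup := by
  induction l generalizing acc with
  | nil => exact h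
  | cons p t ih =>
    apply ih
    unfold pvAddColor
    split_ifs with hc
    · exact h
    · have : p.1 ∉ acc := by simpa [List.contains_iff_mem] using hc
      exact List.Nodup.append h (List.nodup_singleton _) (by simpa using this)

theorem pvColors_nodup (game : List (List (String × Int))) : (pvColors game).Nodup := by
  unfold pvColors
  have : ∀ acc : List String, acc.Nodup →
      (game.foldl (fun acc r => r.foldl pvAddColor acc) acc).Nodup := by
    induction game with
    | nil => intro acc h; exact h
    | cons r t ih => intro acc h; exact ih _ (pvAddColor_nodup r acc h)
  exact this [] List.nodup_nil

-- with nodup keys per round, B's per-round first-match lookup yields exactly that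
-- round's (at most one) amount for c
theorem pvAmts_of_not_mem (l : List (String × Int)) (c : String)
    (h : c ∉ l.map Prod.fst) : pvAmts l c = [] := by
  induction l with
  | nil => rfl
  | cons p t ih =>
    simp only [List.map_cons, List.mem_cons, not_or] at h
    simp [pvAmts, List.filter_cons, Ne.symm h.1]
    simpa [pvAmts] using ih h.2

theorem pvFind_eq_amts (l : List (String × Int)) (c : String)
    (h : (l.map Prod.fst).Nodup) :
    ((l.find? (fun p => p.1 == c)).map Prod.snd).toList = pvAmts l c := by
  induction l with
  | nil => rfl
  | cons p t ih =>
    simp only [List.map_cons, List.nodup_cons] at h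
    by_cases hc : p.1 = c
    · subst hc
      rw [pvAmts]
      simp [List.find?_cons, List.filter_cons, pvAmts_of_not_mem t p.1 h.1]
      simpa [pvAmts] using pvAmts_of_not_mem t p.1 h.1
    · have hb : (p.1 == c) = false := by simpa using hc
      simp only [List.find?_cons, hb]
      rw [ih h.2]
      simp [pvAmts, List.filter_cons, hb]

theorem pvColorAmounts_eq (game : List (List (String × Int))) (c : String)
    (h : ∀ r ∈ game, (r.map Prod.fst).Nodup) :
    pvColorAmounts game c = pvAmtsG game c := by
  induction game with
  | nil => rfl
  | cons r t ih =>
    simp only [pvColorAmounts, List.filterMap_cons, pvAmtsG, List.flatMap_cons]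
    have hr := pvFind_eq_amts r c (h r (List.mem_cons_self))
    have ht : pvColorAmounts t c = pvAmtsG t c := ih (fun r hr => h r (List.mem_cons_of_mem _ hr))
    cases hf : (r.find? (fun p => p.1 == c)).map Prod.snd with
    | none =>
      rw [hf] at hr
      simp only [Option.toList] at hr
      simpa [← hr] using ht
    | some v =>
      rw [hf] at hr
      simp only [Option.toList] at hr
      rw [← hr]
      simpa [pvColorAmounts, pvAmtsG] using ht

-- colors B finds are exactly those with a nonempty amount list
theorem pvAmtsG_ne_nil (game : List (List (String × Int))) (c : String)
    (h : c ∈ pvColors game) : pvAmtsG game c ≠ [] := by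
  intro hnil
  have hk : (game.foldl (fun d r => r.foldl pvStepA d) PySem.Dict.empty).get? c = none := by
    rw [pvGameFold_get?, hnil]
    simp [PySem.Dict.get?_empty]
  have hmem : c ∈ (game.foldl (fun d r => r.foldl pvStepA d) PySem.Dict.empty).keys := by
    rw [pvGameFold_keys]
    simpa [pvColors, PySem.Dict.keys_empty] using h
  rw [PySem.Dict.get?_eq_none_iff_not_mem_keys] at hk
  exact hk hmem

-- ===== VERDICT (by name: the statement is the Claim_ definition above) =====
theorem calculatePowerOfGame_spec : Claim_equal_calculatePowerOfGame := by
  intro game _ hpre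
  unfold Spec_calculatePowerOfGame calculatePowerOfGame calculatePowerOfGame_alt
  show (game.foldl (fun d a_round => a_round.foldl pvStepA d) PySem.Dict.empty).values.prod
      = ((pvColors game).map (fun color => pvMaxList (pvColorAmounts game color))).prod
  set D := game.foldl (fun d r => r.foldl pvStepA d) PySem.Dict.empty with hD
  have hkeys : D.keys = pvColors game := by
    rw [hD, pvGameFold_keys]
    simp [pvColors, PySem.Dict.keys_empty]
  have hnd : D.keys.Nodup := by rw [hkeys]; exact pvColors_nodup game
  rw [PySem.Dict.values_eq_map_keys D hnd 0, hkeys]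
  congr 1
  apply List.map_congr_left
  intro c hc
  have hne := pvAmtsG_ne_nil game c hc
  have hget : D.get? c = some (pvMaxList (pvAmtsG game c)) := by
    rw [hD, pvGameFold_get?]
    simp only [PySem.Dict.get?_empty]
    exact pvOptStep_none _ hne
  rw [PySem.Dict.getD_eq_get?_getD, hget, pvColorAmounts_eq game c hpre]
  rfl
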